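-- pv_equiv track=rewrite | github.com/yorkypy/selise-intervie | gfg/balanceArray.py | minValToBalance1
-- ===== SOURCE A (Python) =====
-- def minValToBalance1(arr):
--     sum1=0
--     sum2=0
--     for i in range(0,int(len(arr)/2)):
--         sum1+=arr[i]
--     for j in range(int(len(arr)/2), len(arr)):
--         sum2+=arr[j]
--     if sum1>sum2:
--         num=sum1-sum2
--     else:
--         num=sum2-sum1
--     return num
-- ===== SOURCE B (Python) =====
-- def minValToBalance1(arr):
--     # Two-pointer scan from both ends inward: each step pairs one element of
--     # the first half (added) with one of the second half (subtracted); an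
--     # unpaired middle element belongs to the second half.
--     d = 0
--     lo, hi = 0, len(arr) - 1
--     while lo < hi:
--         d += arr[lo] - arr[hi]
--         lo += 1
--         hi -= 1
--     if lo == hi:
--         d -= arr[lo]
--     return abs(d)
-- ===== Notes on version B (the rewrite author's own statement) =====
-- stated objective: alternative
-- what changed: Replaces A's two staged half-sum loops and comparison branch with a single two-pointer scan from both ends inward, accumulating one signed difference (middle element of an odd-length array subtracted after the loop) and returning its absolute value.
import Mathlib
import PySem

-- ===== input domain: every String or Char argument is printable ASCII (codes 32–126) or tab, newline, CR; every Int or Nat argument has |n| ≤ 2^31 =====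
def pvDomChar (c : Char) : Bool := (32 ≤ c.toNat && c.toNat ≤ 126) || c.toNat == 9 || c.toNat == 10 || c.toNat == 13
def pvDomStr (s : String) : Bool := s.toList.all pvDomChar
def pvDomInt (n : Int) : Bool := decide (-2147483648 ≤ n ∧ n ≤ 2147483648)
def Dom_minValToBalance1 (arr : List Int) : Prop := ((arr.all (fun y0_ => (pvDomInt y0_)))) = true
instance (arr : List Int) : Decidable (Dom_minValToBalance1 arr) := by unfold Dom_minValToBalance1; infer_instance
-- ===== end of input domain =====

-- B (alternative): a single two-pointer scan from both ends accumulating one signed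
-- difference, instead of A's two staged half-sum loops and comparison branch.


-- ===== PORT A =====
-- Port of A: two index loops over the two halves, then the comparison branch.
def minValToBalance1 (arr : List Int) : Int :=
  let sum1 : Int := (PySem.List.pyRange 0 ((arr.length : Int) / 2) 1).foldl
    (fun s i => s + PySem.List.pyGetD arr i 0) 0
  let sum2 : Int := (PySem.List.pyRange ((arr.length : Int) / 2) (arr.length : Int) 1).foldl
    (fun s j => s + PySem.List.pyGetD arr j 0) 0
  if sum1 > sum2 then sum1 - sum2 else sum2 - sum1

-- ===== PORT B =====
-- Port of B's while loop: lo/hi move inward, d accumulates arr[lo] - arr[hi];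
-- after the loop an unpaired middle element (lo == hi) is subtracted.
def pvLoop (arr : List Int) (lo hi d : Int) : Int :=
  if lo < hi then
    pvLoop arr (lo + 1) (hi - 1) (d + PySem.List.pyGetD arr lo 0 - PySem.List.pyGetD arr hi 0)
  else if lo = hi then d - PySem.List.pyGetD arr lo 0
  else d
termination_by (hi - lo).toNat
decreasing_by omega

def minValToBalance1_alt (arr : List Int) : Int :=
  |pvLoop arr 0 ((arr.length : Int) - 1) 0|

-- ===== PRECONDITION & SPEC =====
def Spec_minValToBalance1 (arr : List Int) (out : Int) : Prop := out = minValToBalance1_alt arr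
instance (arr : List Int) (out : Int) : Decidable (Spec_minValToBalance1 arr out) := by unfold Spec_minValToBalance1; infer_instance

-- ===== CLAIM =====
def Claim_equal_minValToBalance1 : Prop := ∀ (arr : List Int), Dom_minValToBalance1 arr → Spec_minValToBalance1 arr (minValToBalance1 arr)

-- ===== LEMMAS AND PROOFS =====

-- Sum of A's first loop equals the sum of the first k elements.
theorem foldl_pyRange_sum_take (xs : List Int) (k : Nat) (hk : k ≤ xs.length) :
    (PySem.List.pyRange 0 (k : Int) 1).foldl (fun s i => s + PySem.List.pyGetD xs i 0) 0
      = (xs.take k).sum := by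
  induction k with
  | zero => simp
  | succ n ih =>
    have hn : n ≤ xs.length := Nat.le_of_succ_le hk
    have hlt : n < xs.length := hk
    have hget : PySem.List.pyGetD xs (n : Int) 0 = xs[n] := by
      rw [PySem.List.pyGetD_eq_getElem] <;> simp [hlt]
    rw [show ((n + 1 : Nat) : Int) = (n : Int) + 1 by push_cast; ring,
        PySem.List.pyRange_one_succ_right (by positivity)]
    rw [List.foldl_append, ih hn]
    rw [List.foldl_cons, List.foldl_nil, hget, List.sum_take_succ _ _ hlt]

-- Prefix sums as Finset sums of getD.
theorem take_sum_eq_range (xs : List Int) (k : Nat) (hk : k ≤ xs.length) :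
    (xs.take k).sum = ∑ i ∈ Finset.range k, xs.getD i 0 := by
  induction k with
  | zero => simp
  | succ n ih =>
    have hlt : n < xs.length := hk
    rw [List.sum_take_succ _ _ hlt, Finset.sum_range_succ, ih (Nat.le_of_succ_le hk)]
    simp [List.getD, hlt]

-- The two-pointer loop computes (first-half sum) − (second-half sum) of the segment [lo, hi].
theorem pvLoop_eq (arr : List Int) : ∀ (k lo hi : Nat), hi - lo = k → lo ≤ hi → hi < arr.length →
    ∀ d : Int, pvLoop arr (lo : Int) (hi : Int) d
      = d + (∑ i ∈ Finset.Ico lo ((lo + hi + 1) / 2), arr.getD i 0)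
          - ∑ i ∈ Finset.Ico ((lo + hi + 1) / 2) (hi + 1), arr.getD i 0 := by
  intro k
  induction k using Nat.strong_induction_on with
  | _ k ih =>
    intro lo hi hk hle hlen d
    have hgetlo : PySem.List.pyGetD arr (lo : Int) 0 = arr.getD lo 0 := by
      simp [PySem.List.pyGetD_natCast]
    have hgethi : PySem.List.pyGetD arr (hi : Int) 0 = arr.getD hi 0 := by
      simp [PySem.List.pyGetD_natCast]
    rcases Nat.lt_or_ge lo hi with hlt | hge
    · -- loop body runs
      rw [pvLoop, if_pos (by exact_mod_cast hlt)]
      have h1 : ((lo : Int) + 1) = ((lo + 1 : Nat) : Int) := by push_cast; ring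
      have h2 : ((hi : Int) - 1) = ((hi - 1 : Nat) : Int) := by omega
      rw [hgetlo, hgethi, h1, h2]
      have hm1 : lo < (lo + hi + 1) / 2 := by omega
      have hm2 : (lo + hi + 1) / 2 ≤ hi := by omega
      rcases Nat.lt_or_ge (lo + 1) hi with hlt2 | hge2
      · -- at least two more steps possible: use IH on the inner segment
        have hk2 : (hi - 1) - (lo + 1) < k := by omega
        rw [ih _ hk2 (lo + 1) (hi - 1) rfl (by omega) (by omega)]
        have hmid : ((lo + 1) + (hi - 1) + 1) / 2 = (lo + hi + 1) / 2 := by omega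
        rw [hmid]
        have hbot : ∑ i ∈ Finset.Ico lo ((lo + hi + 1) / 2), arr.getD i 0
            = arr.getD lo 0 + ∑ i ∈ Finset.Ico (lo + 1) ((lo + hi + 1) / 2), arr.getD i 0 :=
          Finset.sum_eq_sum_Ico_succ_bot hm1 _
        have htop : ∑ i ∈ Finset.Ico ((lo + hi + 1) / 2) (hi + 1), arr.getD i 0
            = (∑ i ∈ Finset.Ico ((lo + hi + 1) / 2) hi, arr.getD i 0) + arr.getD hi 0 := by
          have := Finset.sum_Ico_succ_top hm2 (fun i => arr.getD i 0)
          simpa using this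
        have hseg : (hi - 1) + 1 = hi := by omega
        rw [hseg, hbot, htop]; ring
      · -- exactly one pair left: hi = lo + 1; inner call falls through
        have hhi : hi = lo + 1 := by omega
        subst hhi
        have : (lo + 1 - 1 : Nat) = lo := by omega
        rw [this, pvLoop, if_neg (by push_cast; omega), if_neg (by push_cast; omega)]
        have hmid : (lo + (lo + 1) + 1) / 2 = lo + 1 := by omega
        rw [hmid]
        rw [show Finset.Ico lo (lo + 1) = {lo} by ext x; simp,
            show Finset.Ico (lo + 1) (lo + 1 + 1) = {lo + 1} by ext x; simp]
        simp
    · -- lo = hi: middle element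
      have heq : lo = hi := by omega
      subst heq
      rw [pvLoop, if_neg (by omega), if_pos rfl, hgetlo]
      have hmid : (lo + lo + 1) / 2 = lo := by omega
      rw [hmid]
      rw [show Finset.Ico lo (lo + 1) = {lo} by ext x; simp]
      simp

-- ===== VERDICT =====
theorem minValToBalance1_spec : Claim_equal_minValToBalance1 := by
  intro arr _
  unfold Spec_minValToBalance1 minValToBalance1 minValToBalance1_alt
  have hkcast : ((arr.length : Int) / 2) = ((arr.length / 2 : Nat) : Int) := by omega
  have hle : arr.length / 2 ≤ arr.length := Nat.div_le_self _ _
  have h1 : (PySem.List.pyRange 0 ((arr.length : Int) / 2) 1).foldl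
      (fun s i => s + PySem.List.pyGetD arr i 0) 0 = (arr.take (arr.length / 2)).sum := by
    rw [hkcast]; exact foldl_pyRange_sum_take arr _ hle
  have h2 : (PySem.List.pyRange ((arr.length : Int) / 2) (arr.length : Int) 1).foldl
      (fun s j => s + PySem.List.pyGetD arr j 0) 0 = (arr.drop (arr.length / 2)).sum := by
    rw [hkcast]
    have h := PySem.List.foldl_pyRange_pyGetD' arr 0 (fun s x => s + x) 0
      (a := ((arr.length / 2 : Nat) : Int)) (Int.natCast_nonneg _)
    simpa [List.sum_eq_foldl] using h
  simp only [h1, h2]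
  rcases Nat.eq_zero_or_pos arr.length with hn | hn
  · have : arr = [] := List.eq_nil_of_length_eq_zero hn
    subst this
    rw [pvLoop]
    norm_num
  · have hcast : ((arr.length : Int) - 1) = ((arr.length - 1 : Nat) : Int) := by omega
    have hloop := pvLoop_eq arr (arr.length - 1 - 0) 0 (arr.length - 1) rfl (by omega) (by omega) 0
    norm_num at hloop
    have hl1 : arr.length - 1 + 1 = arr.length := by omega
    rw [hl1] at hloop
    rw [hcast, hloop]
    have htake := take_sum_eq_range arr _ hle
    simp only [List.getD_eq_getElem?_getD] at htake
    have hall := take_sum_eq_range arr _ (le_refl arr.length)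
    simp only [List.getD_eq_getElem?_getD, List.take_length] at hall
    have hsplit := Finset.sum_Ico_consecutive (fun i => arr[i]?.getD 0)
      (Nat.zero_le (arr.length / 2)) hle
    simp only [← Finset.range_eq_Ico] at hsplit
    have htot : (arr.take (arr.length / 2)).sum + (arr.drop (arr.length / 2)).sum = arr.sum := by
      rw [← List.sum_append, List.take_append_drop]
    have hB : ∑ i ∈ Finset.Ico (arr.length / 2) arr.length, arr[i]?.getD 0
        = (arr.drop (arr.length / 2)).sum := by omega
    rw [← htake, hB]
    set a := (arr.take (arr.length / 2)).sum
    set b := (arr.drop (arr.length / 2)).sum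
    rcases le_or_gt a b with h | h
    · rw [if_neg (by omega), abs_of_nonpos (by omega)]; ring
    · rw [if_pos (by omega), abs_of_nonneg (by omega)]
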